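-- pv_equiv track=rewrite | github.com/ThirajVS/Legal-Summarizer | preprocessing.py | _rank_key_points
-- ===== SOURCE A (Python) =====
-- from typing import Dict, List
--
-- def _rank_key_points(key_points: List[str]) -> List[str]:
--     importance_keywords = [
--         'accused', 'witness', 'evidence', 'section', 'fir',
--         'complaint', 'theft', 'assault', 'murder', 'case'
--     ]
--     scored_points = []
--     for point in key_points:
--         score = 0
--         point_lower = point.lower()
--         for keyword in importance_keywords:
--             if keyword in point_lower:
--                 score += 1
--         scored_points.append((point, score))
--     scored_points.sort(key=lambda x: x[1], reverse=True)
--     return [point for point, score in scored_points]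
-- ===== SOURCE B (Python) =====
-- from typing import List
--
-- def _rank_key_points(key_points: List[str]) -> List[str]:
--     importance_keywords = [
--         'accused', 'witness', 'evidence', 'section', 'fir',
--         'complaint', 'theft', 'assault', 'murder', 'case'
--     ]
--     # counting sort: at most 10 keywords can match, so scores lie in 0..10
--     buckets = [[] for _ in range(11)]
--     for point in key_points:
--         point_lower = point.lower()
--         score = sum(1 for kw in importance_keywords if kw in point_lower)
--         buckets[score].append(point)
--     out = []
--     for bucket in reversed(buckets):
--         out.extend(bucket)
--     return out
-- ===== Notes on version B (the rewrite author's own statement) =====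
-- stated objective: alternative
-- what changed: Replaces build-tuples-then-stable-comparison-sort with a counting sort: each point is appended to one of 11 score buckets in input order and the buckets are concatenated from score 10 down to 0, reproducing the stable descending order without sorting.
import Mathlib
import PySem

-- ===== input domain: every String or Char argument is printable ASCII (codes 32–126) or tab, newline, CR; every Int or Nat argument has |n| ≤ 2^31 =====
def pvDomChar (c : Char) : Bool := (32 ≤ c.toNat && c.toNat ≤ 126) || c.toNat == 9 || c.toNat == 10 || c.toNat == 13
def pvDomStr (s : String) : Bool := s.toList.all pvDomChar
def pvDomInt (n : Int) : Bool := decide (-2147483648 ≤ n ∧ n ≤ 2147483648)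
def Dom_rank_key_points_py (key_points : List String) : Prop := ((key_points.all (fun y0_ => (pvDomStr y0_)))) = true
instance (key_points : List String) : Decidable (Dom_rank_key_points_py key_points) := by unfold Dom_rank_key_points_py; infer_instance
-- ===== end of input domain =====

-- B replaces the stable comparison sort on (point, score) tuples by a counting sort
-- into 11 score buckets concatenated high-to-low (objective: alternative algorithm).

-- the keyword list, shared data of both programs
def pvKeywords : List String :=
  ["accused", "witness", "evidence", "section", "fir",
   "complaint", "theft", "assault", "murder", "case"]

-- ===== PORT A =====
def rank_key_points_py (key_points : List String) : List String :=
  let scored_points : List (String × Int) :=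
    key_points.foldl
      (fun acc point =>
        let point_lower := PySem.Str.lower point
        let score : Int :=
          pvKeywords.foldl
            (fun s kw => if PySem.Str.isIn kw point_lower then s + 1 else s) 0
        acc ++ [(point, score)])
      []
  (PySem.List.sorted scored_points (fun x => x.2) true).map (fun x => x.1)

-- ===== PORT B =====
-- score = sum(1 for kw in importance_keywords if kw in point_lower)
def pvScoreB (point : String) : Nat :=
  (pvKeywords.filter (fun kw => PySem.Str.isIn kw (PySem.Str.lower point))).length

def rank_key_points_py_alt (key_points : List String) : List String :=
  let buckets : List (List String) :=
    key_points.foldl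
      (fun bs point => bs.set (pvScoreB point) ((bs.getD (pvScoreB point) []) ++ [point]))
      (List.replicate 11 [])
  buckets.reverse.foldl (fun out bucket => out ++ bucket) []

-- ===== PRECONDITION & SPEC =====
def Spec_rank_key_points_py (key_points : List String) (out : List String) : Prop := out = rank_key_points_py_alt key_points
instance (key_points : List String) (out : List String) : Decidable (Spec_rank_key_points_py key_points out) := by unfold Spec_rank_key_points_py; infer_instance

-- ===== CLAIM (what is proved, stated in full; the proofs are below) =====
def Claim_equal_rank_key_points_py : Prop := ∀ (key_points : List String), Dom_rank_key_points_py key_points → Spec_rank_key_points_py key_points (rank_key_points_py key_points)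

-- ===== LEMMAS AND PROOFS =====

-- A's Int score, named for the proofs
def pvScoreA (point : String) : Int :=
  pvKeywords.foldl
    (fun s kw => if PySem.Str.isIn kw (PySem.Str.lower point) then s + 1 else s) 0

-- a conditional-increment fold counts the filtered elements
theorem pv_foldl_count {α : Type} (c : α → Bool) :
    ∀ (l : List α) (s0 : Int),
      l.foldl (fun s kw => if c kw then s + 1 else s) s0 = s0 + (l.filter c).length := by
  intro l
  induction l with
  | nil => simp
  | cons x t ih =>
    intro s0
    by_cases h : c x = true
    · simp [h, ih]; ring
    · simp [h, ih]

theorem pv_scoreA_eq (p : String) : pvScoreA p = (pvScoreB p : Int) := by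
  simp [pvScoreA, pvScoreB, pv_foldl_count]

theorem pv_scoreB_le (p : String) : pvScoreB p ≤ 10 := by
  have h := List.length_filter_le (fun kw => PySem.Str.isIn kw (PySem.Str.lower p)) pvKeywords
  simpa [pvKeywords, pvScoreB] using h

-- insertBy passes over elements it does not go before
theorem pv_insertBy_append {α : Type} (before : α → α → Bool) (x : α) :
    ∀ (A B : List α), (∀ y ∈ A, before x y = false) →
      PySem.List.insertBy before x (A ++ B) = A ++ PySem.List.insertBy before x B := by
  intro A
  induction A with
  | nil => simp
  | cons a t ih =>
    intro B h
    have ha : before x a = false := h a (by simp)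
    simp [PySem.List.insertBy, ha, ih B (fun y hy => h y (by simp [hy]))]

-- insertBy goes in front of a list it goes before everywhere
theorem pv_insertBy_front {α : Type} (before : α → α → Bool) (x : α) :
    ∀ (B : List α), (∀ y ∈ B, before x y = true) →
      PySem.List.insertBy before x B = x :: B := by
  intro B
  cases B with
  | nil => simp [PySem.List.insertBy]
  | cons b t => intro h; simp [PySem.List.insertBy, h b (by simp)]

-- the scored pair of a point
def pvPair (p : String) : String × Int := (p, (pvScoreB p : Int))

-- buckets of scored pairs over a descending score list S
def pvFlatP (S : List Nat) (xs : List String) : List (String × Int) :=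
  S.flatMap (fun s => (xs.map pvPair).filter (fun q => q.2 = (s : Int)))

-- one bucket of the snoc list
theorem pv_filter_snoc (xs : List String) (x : String) (s : Nat) :
    (((xs ++ [x]).map pvPair).filter (fun q => q.2 = (s : Int)))
      = ((xs.map pvPair).filter (fun q => q.2 = (s : Int)))
        ++ (if pvScoreB x = s then [pvPair x] else []) := by
  simp only [List.map_append, List.map_cons, List.map_nil, List.filter_append]
  congr 1
  by_cases h : pvScoreB x = s <;> simp [pvPair, h]

-- pvFlatP unfolds one bucket at a time
theorem pv_flatP_cons (s : Nat) (T : List Nat) (xs : List String) :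
    pvFlatP (s :: T) xs
      = ((xs.map pvPair).filter (fun q => q.2 = (s : Int))) ++ pvFlatP T xs := rfl

-- every element of the flat list carries a score from S
theorem pv_mem_flatP {y : String × Int} :
    ∀ {S : List Nat} {xs : List String},
      y ∈ pvFlatP S xs → ∃ t ∈ S, y.2 = (t : Int) := by
  intro S
  induction S with
  | nil => intro xs hy; cases hy
  | cons s T ih =>
    intro xs hy
    rw [pv_flatP_cons, List.mem_append] at hy
    rcases hy with hy | hy
    · exact ⟨s, by simp, by simpa using (List.mem_filter.mp hy).2⟩
    · obtain ⟨t, ht, h2⟩ := ih hy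
      exact ⟨t, by simp [ht], h2⟩

theorem pv_flatP_snoc_of_not_mem (x : String) :
    ∀ (S : List Nat), pvScoreB x ∉ S → ∀ (xs : List String),
      pvFlatP S (xs ++ [x]) = pvFlatP S xs := by
  intro S
  induction S with
  | nil => intro _ _; rfl
  | cons s T ih =>
    intro h xs
    have hs : pvScoreB x ≠ s := fun hc => h (by simp [hc])
    rw [pv_flatP_cons, pv_flatP_cons, pv_filter_snoc, if_neg hs, List.append_nil,
      ih (fun hc => h (by simp [hc])) xs]

theorem pv_insert_flat (x : String) :
    ∀ (S : List Nat), S.Pairwise (· > ·) → pvScoreB x ∈ S →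
      ∀ (xs : List String),
        PySem.List.insertBy (fun a b => decide (b.2 < a.2)) (pvPair x) (pvFlatP S xs)
          = pvFlatP S (xs ++ [x]) := by
  intro S
  induction S with
  | nil => intro _ h; cases h
  | cons s T ih =>
    intro hpw hmem xs
    have hpw' : T.Pairwise (· > ·) := hpw.of_cons
    have hlt : ∀ t ∈ T, s > t := fun t ht => List.rel_of_pairwise_cons hpw ht
    by_cases hs : pvScoreB x = s
    · -- x lands at the end of bucket s, before every lower bucket
      have hx_not : pvScoreB x ∉ T := fun hc => absurd (hlt _ hc) (by omega)
      rw [pv_flatP_cons, pv_insertBy_append, pv_insertBy_front]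
      · rw [pv_flatP_cons, pv_filter_snoc, if_pos hs,
          pv_flatP_snoc_of_not_mem x T hx_not xs]
        simp
      · intro y hy
        obtain ⟨t, ht, hy2⟩ := pv_mem_flatP hy
        have := hlt t ht
        simp only [pvPair, hy2]
        simp only [decide_eq_true_eq]
        exact_mod_cast by omega
      · intro y hy
        rw [List.mem_filter] at hy
        have hy2 : y.2 = (s : Int) := by simpa using hy.2
        simp only [pvPair, hy2, hs, decide_eq_false_iff_not]
        omega
    · -- x belongs to a lower bucket: skip bucket s and recurse
      have hmem' : pvScoreB x ∈ T := by
        rcases List.mem_cons.mp hmem with h | h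
        · exact absurd h hs
        · exact h
      have hgt : s > pvScoreB x := hlt _ hmem'
      rw [pv_flatP_cons, pv_insertBy_append, ih hpw' hmem' xs]
      · rw [pv_flatP_cons, pv_filter_snoc, if_neg hs, List.append_nil]
      · intro y hy
        rw [List.mem_filter] at hy
        have hy2 : y.2 = (s : Int) := by simpa using hy.2
        simp only [pvPair, hy2, decide_eq_false_iff_not]
        exact_mod_cast by omega

-- the descending score list 10,9,…,0
theorem pv_range_rev_pairwise : (List.range 11).reverse.Pairwise (fun a b => a > b) := by
  decide

-- A's sorted scored list is the bucket concatenation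
theorem pv_sortedA (xs : List String) :
    PySem.List.sorted (xs.map pvPair) (fun q => q.2) true
      = pvFlatP (List.range 11).reverse xs := by
  rw [PySem.List.sorted_rev_eq_foldl_insertBy]
  induction xs using List.reverseRecOn with
  | nil => simp [pvFlatP]
  | append_singleton xs x ih =>
    rw [List.map_append, List.foldl_append]
    simp only [List.map_cons, List.map_nil, List.foldl_cons, List.foldl_nil]
    rw [ih]
    exact pv_insert_flat x _ pv_range_rev_pairwise
      (by simp [List.mem_reverse, List.mem_range]; have := pv_scoreB_le x; omega) xs

-- B's bucket fold, characterised
theorem pv_bucketsB (xs : List String) :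
    xs.foldl
      (fun bs point => bs.set (pvScoreB point) ((bs.getD (pvScoreB point) []) ++ [point]))
      (List.replicate 11 [])
      = (List.range 11).map (fun s => xs.filter (fun p => pvScoreB p = s)) := by
  induction xs using List.reverseRecOn with
  | nil =>
    simp only [List.foldl_nil, List.filter_nil]
    rw [List.map_const', List.length_range]
  | append_singleton xs x ih =>
    rw [List.foldl_append, List.foldl_cons, List.foldl_nil, ih]
    have hsx : pvScoreB x < 11 := by have := pv_scoreB_le x; omega
    have hgetD : ((List.range 11).map (fun s => xs.filter (fun p => pvScoreB p = s))).getD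
        (pvScoreB x) [] = xs.filter (fun p => pvScoreB p = pvScoreB x) := by
      rw [List.getD_eq_getElem _ _ (by simpa using hsx)]
      simp
    rw [hgetD]
    apply List.ext_getElem
    · simp
    · intro i h1 h2
      have hi : i < 11 := by simpa using h2
      rw [List.getElem_set]
      by_cases h : pvScoreB x = i
      · simp [h, List.filter_append, List.filter_cons]
      · simp [h, List.filter_append, List.filter_cons]

theorem pv_foldl_append {α : Type} :
    ∀ (l : List (List α)) (acc : List α),
      l.foldl (fun out b => out ++ b) acc = acc ++ l.flatten := by
  intro l
  induction l with
  | nil => simp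
  | cons b t ih => intro acc; simp [ih, List.append_assoc]

-- projecting the points out of the scored buckets
theorem pv_map_fst_flatP :
    ∀ (S : List Nat) (xs : List String),
      (pvFlatP S xs).map (fun q => q.1)
        = S.flatMap (fun s => xs.filter (fun p => pvScoreB p = s)) := by
  intro S
  induction S with
  | nil => intro xs; rfl
  | cons s T ih =>
    intro xs
    rw [pv_flatP_cons, List.map_append, ih]
    congr 1
    simp [List.filter_map, List.map_map, pvPair, Function.comp_def]

-- ===== VERDICT (by name: the statement is the Claim_ definition above) =====
theorem rank_key_points_py_spec : Claim_equal_rank_key_points_py := by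
  intro xs _
  show rank_key_points_py xs = rank_key_points_py_alt xs
  have hA : rank_key_points_py xs
      = (PySem.List.sorted (xs.map pvPair) (fun q => q.2) true).map (fun q => q.1) := by
    unfold rank_key_points_py
    have hfun : (fun (acc : List (String × Int)) (point : String) =>
        let point_lower := PySem.Str.lower point
        let score : Int :=
          pvKeywords.foldl
            (fun s kw => if PySem.Str.isIn kw point_lower then s + 1 else s) 0
        acc ++ [(point, score)])
        = fun acc point => acc ++ [pvPair point] := by
      funext acc point
      show acc ++ [(point, pvScoreA point)] = acc ++ [pvPair point]
      rw [pv_scoreA_eq]; rfl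
    rw [hfun, PySem.List.foldl_append_singleton_eq_map, List.nil_append]
  have hB : rank_key_points_py_alt xs
      = ((List.range 11).reverse).flatMap (fun s => xs.filter (fun p => pvScoreB p = s)) := by
    unfold rank_key_points_py_alt
    rw [pv_bucketsB, pv_foldl_append, List.nil_append, ← List.map_reverse]
    simp [List.flatMap_def]
  rw [hA, pv_sortedA, hB, pv_map_fst_flatP]
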